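-- pv_equiv track=rewrite | github.com/pypi-data/pypi-mirror-361 | packages/infradsl/infradsl-0.1.4-py3-none-any.whl/infradsl/core/cross_cloud_cidr_manager.py | _sort_regions_geographically
-- ===== SOURCE A (Python) =====
-- from typing import Dict, Any, List, Optional
--
-- def _sort_regions_geographically(regions: List[str], provider: str) -> List[str]:
--     """Sort regions by geographic proximity"""
--
--     # Simplified geographic grouping - in production would use actual coordinates
--     geographic_groups = {
--         "aws": {
--             "us": ["us-east-1", "us-east-2", "us-west-1", "us-west-2"],
--             "eu": ["eu-west-1", "eu-west-2", "eu-central-1"],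
--             "ap": ["ap-southeast-1", "ap-southeast-2", "ap-northeast-1"]
--         },
--         "gcp": {
--             "us": ["us-central1", "us-east1", "us-west1"],
--             "eu": ["europe-west1", "europe-west2", "europe-west3"],
--             "asia": ["asia-southeast1", "asia-northeast1"]
--         }
--     }
--
--     provider_groups = geographic_groups.get(provider, {})
--     sorted_regions = []
--
--     # Group regions geographically
--     for group_regions in provider_groups.values():
--         for region in regions:
--             if region in group_regions and region not in sorted_regions:
--                 sorted_regions.append(region)
--
--     # Add any remaining regions
--     for region in regions:
--         if region not in sorted_regions:
--             sorted_regions.append(region)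
--
--     return sorted_regions
-- ===== SOURCE B (Python) =====
-- from typing import List
--
--
-- def _sort_regions_geographically(regions: List[str], provider: str) -> List[str]:
--     """Sort regions by geographic proximity (bucket distribution by group rank)."""
--
--     geographic_groups = {
--         "aws": {
--             "us": ["us-east-1", "us-east-2", "us-west-1", "us-west-2"],
--             "eu": ["eu-west-1", "eu-west-2", "eu-central-1"],
--             "ap": ["ap-southeast-1", "ap-southeast-2", "ap-northeast-1"]
--         },
--         "gcp": {
--             "us": ["us-central1", "us-east1", "us-west1"],
--             "eu": ["europe-west1", "europe-west2", "europe-west3"],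
--             "asia": ["asia-southeast1", "asia-northeast1"]
--         }
--     }
--
--     groups = list(geographic_groups.get(provider, {}).values())
--
--     def rank(region: str) -> int:
--         for i, g in enumerate(groups):
--             if region in g:
--                 return i
--         return len(groups)
--
--     # one pass: distribute first occurrences into rank buckets
--     buckets = [[] for _ in range(len(groups) + 1)]
--     seen = set()
--     for region in regions:
--         if region not in seen:
--             seen.add(region)
--             buckets[rank(region)].append(region)
--
--     return [region for bucket in buckets for region in bucket]
-- ===== Notes on version B (the rewrite author's own statement) =====
-- stated objective: faster
-- what changed: A rescans the whole regions list once per geographic group and dedups with O(n) list-membership tests on the growing output; B makes a single pass over regions, ranking each first occurrence by the index of the first group containing it and distributing it into per-rank buckets that are concatenated.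
import Mathlib
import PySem

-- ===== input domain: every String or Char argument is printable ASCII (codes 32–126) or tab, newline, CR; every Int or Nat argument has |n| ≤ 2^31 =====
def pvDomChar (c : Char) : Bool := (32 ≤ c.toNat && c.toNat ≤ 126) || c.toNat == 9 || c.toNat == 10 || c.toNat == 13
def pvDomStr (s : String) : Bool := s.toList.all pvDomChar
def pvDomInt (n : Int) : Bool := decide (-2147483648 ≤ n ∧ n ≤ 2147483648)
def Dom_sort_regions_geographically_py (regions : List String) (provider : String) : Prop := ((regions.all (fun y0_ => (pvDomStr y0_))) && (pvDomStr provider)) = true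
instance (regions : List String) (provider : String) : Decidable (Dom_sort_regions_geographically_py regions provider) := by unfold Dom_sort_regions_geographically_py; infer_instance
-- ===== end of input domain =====

-- B replaces A's group-by-group rescans with quadratic list-membership dedup by one pass over
-- regions distributing first occurrences into per-rank buckets (objective: faster, same result).

-- ===== PORT A =====
-- the module-level literal `geographic_groups` (shared by both Pythons, which each spell it out)
def pvGG : PySem.Dict String (PySem.Dict String (List String)) :=
  PySem.Dict.mk
    [("aws", PySem.Dict.mk
        [("us", ["us-east-1", "us-east-2", "us-west-1", "us-west-2"]),
         ("eu", ["eu-west-1", "eu-west-2", "eu-central-1"]),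
         ("ap", ["ap-southeast-1", "ap-southeast-2", "ap-northeast-1"])]),
     ("gcp", PySem.Dict.mk
        [("us", ["us-central1", "us-east1", "us-west1"]),
         ("eu", ["europe-west1", "europe-west2", "europe-west3"]),
         ("asia", ["asia-southeast1", "asia-northeast1"])])]

def sort_regions_geographically_py (regions : List String) (provider : String) : List String :=
  let provider_groups := pvGG.getD provider (PySem.Dict.mk [])
  -- for group_regions in provider_groups.values(): for region in regions: …
  let sorted_regions := provider_groups.values.foldl
    (fun acc group_regions => regions.foldl
      (fun acc region =>
        if group_regions.contains region && !(acc.contains region) then acc ++ [region] else acc)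
      acc) []
  -- for region in regions: if region not in sorted_regions: append
  regions.foldl
    (fun acc region => if !(acc.contains region) then acc ++ [region] else acc)
    sorted_regions

-- ===== PORT B =====
-- rank(region): index of first group containing it, else len(groups)
def pvRankAux : List (List String) → Nat → String → Nat
  | [], i, _ => i
  | g :: gs, i, r => if g.contains r then i else pvRankAux gs (i + 1) r

def sort_regions_geographically_py_alt (regions : List String) (provider : String) : List String :=
  let groups := (pvGG.getD provider (PySem.Dict.mk [])).values
  -- one pass distributing first occurrences into rank buckets
  let st := regions.foldl
    (fun (st : PySem.Set String × List (List String)) region =>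
      if PySem.Set.contains st.1 region then st
      else (PySem.Set.add st.1 region,
            st.2.set (pvRankAux groups 0 region)
              (st.2.getD (pvRankAux groups 0 region) [] ++ [region])))
    (PySem.Set.empty, List.replicate (groups.length + 1) [])
  st.2.flatten

-- ===== PRECONDITION & SPEC =====
def Spec_sort_regions_geographically_py (regions : List String) (provider : String) (out : List String) : Prop := out = sort_regions_geographically_py_alt regions provider
instance (regions : List String) (provider : String) (out : List String) : Decidable (Spec_sort_regions_geographically_py regions provider out) := by unfold Spec_sort_regions_geographically_py; infer_instance

-- ===== CLAIM (what is proved, stated in full; the proofs are below) =====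
def Claim_equal_sort_regions_geographically_py : Prop := ∀ (regions : List String) (provider : String), Dom_sort_regions_geographically_py regions provider → Spec_sort_regions_geographically_py regions provider (sort_regions_geographically_py regions provider)

-- ===== LEMMAS AND PROOFS =====

-- A's inner pass: append unseen regions satisfying p, keeping first occurrences
def pvPass (p : String → Bool) (c : List String) (l : List String) : List String :=
  l.foldl (fun acc r => if p r && !(acc.contains r) then acc ++ [r] else acc) c

-- dedup via Set.ofList commutes with filter
theorem pvFoldAdd_filter (p : String → Bool) :
    ∀ (l c : List String),
      (l.foldl PySem.Set.add c).filter p = (l.filter p).foldl PySem.Set.add (c.filter p) := by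
  intro l
  induction l with
  | nil => intro c; rfl
  | cons x t ih =>
    intro c
    have hadd : (PySem.Set.add c x).filter p = if p x then PySem.Set.add (c.filter p) x else c.filter p := by
      by_cases hp : p x
      · by_cases hc : x ∈ c
        · have h1 : PySem.Set.contains c x = true := by
            simp [PySem.Set.contains, List.contains_eq_mem, hc]
          have h2 : PySem.Set.contains (c.filter p) x = true := by
            simp [PySem.Set.contains, List.contains_eq_mem, List.mem_filter, hc, hp]
          simp [PySem.Set.add, h1, h2, hp, hc]
        · have h1 : PySem.Set.contains c x = false := by
            simp [PySem.Set.contains, List.contains_eq_mem, hc]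
          have h2 : PySem.Set.contains (c.filter p) x = false := by
            simp [PySem.Set.contains, List.contains_eq_mem, List.mem_filter, hc]
          simp [PySem.Set.add, h1, h2, hp, hc, List.filter_append]
      · have hps : p x = false := by simpa using hp
        by_cases hc : PySem.Set.contains c x = true
        · have hm : x ∈ c := by simpa [PySem.Set.contains, List.contains_eq_mem] using hc
          simp [PySem.Set.add, hm, hps]
        · have hm : x ∉ c := by simpa [PySem.Set.contains, List.contains_eq_mem] using hc
          simp [PySem.Set.add, hm, hps, List.filter_append]
    by_cases hp : p x
    · simp only [List.foldl_cons, List.filter_cons, hp, if_pos]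
      rw [ih, hadd]
      simp [hp]
    · have hps : p x = false := by simpa using hp
      simp only [List.foldl_cons, List.filter_cons, hps]
      rw [ih, hadd]
      simp [hps]

theorem pvOfList_filter (p : String → Bool) (l : List String) :
    (PySem.Set.ofList l).filter p = PySem.Set.ofList (l.filter p) := by
  rw [PySem.Set.ofList_eq_foldl, PySem.Set.ofList_eq_foldl, pvFoldAdd_filter]
  rfl

-- a pass from a prefix none of whose elements satisfies p just appends
theorem pvPass_prefix (p : String → Bool) (acc0 : List String)
    (h : ∀ r, p r = true → acc0.contains r = false) :
    ∀ (l c : List String), pvPass p (acc0 ++ c) l = acc0 ++ pvPass p c l := by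
  intro l
  induction l with
  | nil => intro c; rfl
  | cons x t ih =>
    intro c
    unfold pvPass
    simp only [List.foldl_cons]
    by_cases hp : p x = true
    · have hca : (acc0 ++ c).contains x = c.contains x := by
        rw [List.contains_append, h x hp, Bool.false_or]
      by_cases hc : c.contains x = true
      · simp only [hp, hca, hc, Bool.not_true, Bool.and_false, if_neg Bool.false_ne_true]
        exact ih c
      · have hc' : c.contains x = false := by simpa using hc
        simp only [hp, hca, hc', Bool.not_false, Bool.and_true, if_pos rfl]
        rw [List.append_assoc]
        exact ih (c ++ [x])
    · have hps : p x = false := by simpa using hp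
      simp only [hps, Bool.false_and, if_neg Bool.false_ne_true]
      exact ih c

theorem pvPass_nil (p : String → Bool) (l : List String) :
    pvPass p [] l = PySem.Set.ofList (l.filter p) := by
  unfold pvPass
  have hstep : (fun (acc : List String) r => if p r && !(acc.contains r) then acc ++ [r] else acc)
      = (fun (acc : List String) r => if p r then PySem.Set.add acc r else acc) := by
    funext acc r
    by_cases hp : p r
    · by_cases hc : acc.contains r = true
      · have : PySem.Set.contains acc r = true := hc
        simp [PySem.Set.add, hp, hc, this]
      · have hc' : acc.contains r = false := by simpa using hc
        have : PySem.Set.contains acc r = false := hc'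
        simp [PySem.Set.add, hp, hc', this]
    · simp [hp]
  rw [hstep, PySem.List.foldl_if_eq_foldl_filter, PySem.Set.ofList_eq_foldl]

-- A's grouped phase, characterized (groups pairwise disjoint)
theorem pvOuter (regions : List String) :
    ∀ (gs : List (List String)) (acc0 : List String),
      gs.Pairwise (fun g h => ∀ r, r ∈ g → r ∉ h) →
      (∀ g ∈ gs, ∀ r ∈ acc0, r ∉ g) →
      gs.foldl (fun acc group_regions => regions.foldl
        (fun acc region =>
          if group_regions.contains region && !(acc.contains region) then acc ++ [region] else acc)
        acc) acc0
      = acc0 ++ (gs.map (fun g => PySem.Set.ofList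
          (regions.filter (fun r => g.contains r)))).flatten := by
  intro gs
  induction gs with
  | nil => intro acc0 _ _; simp
  | cons g gs ih =>
    intro acc0 hd h0
    simp only [List.foldl_cons, List.map_cons, List.flatten_cons]
    have h1 : ∀ r, (fun r => g.contains r) r = true → acc0.contains r = false := by
      intro r hr
      have : r ∉ acc0 := fun hmem => h0 g (List.mem_cons_self) r hmem (by
        simpa [List.contains_eq_mem] using hr)
      simp [List.contains_eq_mem, this]
    have hpass : regions.foldl
        (fun acc region =>
          if g.contains region && !(acc.contains region) then acc ++ [region] else acc) acc0
        = acc0 ++ PySem.Set.ofList (regions.filter (fun r => g.contains r)) := by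
      have hpp := pvPass_prefix (fun r => g.contains r) acc0 h1 regions []
      rw [List.append_nil, pvPass_nil] at hpp
      unfold pvPass at hpp
      exact hpp
    rw [hpass, ih _ hd.of_cons, List.append_assoc]
    intro g' hg' r hr
    rcases List.mem_append.mp hr with hra | hrb
    · exact h0 g' (List.mem_cons_of_mem _ hg') r hra
    · have hrg : r ∈ g := by
        have : r ∈ regions.filter (fun r => g.contains r) := by
          simpa [PySem.Set.mem_ofList] using hrb
        have := List.of_mem_filter this
        simpa [List.contains_eq_mem] using this
      exact (List.pairwise_cons.mp hd).1 g' hg' r hrg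

-- A's trailing phase is a pvPass with the "in no group" predicate
theorem pvFinal_pass (p : String → Bool) :
    ∀ (l acc : List String), (∀ r ∈ l, p r = false → acc.contains r = true) →
      l.foldl (fun acc region => if !(acc.contains region) then acc ++ [region] else acc) acc
      = pvPass p acc l := by
  intro l
  induction l with
  | nil => intro acc _; rfl
  | cons x t ih =>
    intro acc h
    unfold pvPass
    simp only [List.foldl_cons]
    by_cases hp : p x = true
    · by_cases hc : acc.contains x = true
      · simp only [hp, hc, Bool.not_true, Bool.and_false, if_neg Bool.false_ne_true]
        exact ih acc (fun r hr hpr => h r (List.mem_cons_of_mem _ hr) hpr)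
      · have hc' : acc.contains x = false := by simpa using hc
        simp only [hp, hc', Bool.not_false, Bool.and_true, if_pos rfl]
        refine ih (acc ++ [x]) ?_
        intro r hr hpr
        rw [List.contains_append, h r (List.mem_cons_of_mem _ hr) hpr, Bool.true_or]
    · have hps : p x = false := by simpa using hp
      have hc : acc.contains x = true := h x List.mem_cons_self hps
      simp only [hps, hc, Bool.not_true, Bool.and_false, Bool.false_and,
        if_neg Bool.false_ne_true]
      exact ih acc (fun r hr hpr => h r (List.mem_cons_of_mem _ hr) hpr)

-- pvRankAux facts
theorem pvRankAux_shift (gs : List (List String)) (r : String) :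
    ∀ i, pvRankAux gs i r = i + pvRankAux gs 0 r := by
  induction gs with
  | nil => intro i; simp [pvRankAux]
  | cons g gs ih =>
    intro i
    by_cases hm : r ∈ g
    · simp [pvRankAux, List.contains_eq_mem, hm]
    · simp only [pvRankAux, List.contains_eq_mem, hm, decide_false, Bool.false_eq_true,
        if_neg, not_false_iff]
      rw [ih (i + 1), ih 1]
      omega

theorem pvRankAux_le (gs : List (List String)) (r : String) : pvRankAux gs 0 r ≤ gs.length := by
  induction gs with
  | nil => simp [pvRankAux]
  | cons g gs ih =>
    by_cases hm : r ∈ g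
    · simp [pvRankAux, List.contains_eq_mem, hm]
    · simp only [pvRankAux, List.contains_eq_mem, hm, decide_false, Bool.false_eq_true,
        if_neg, not_false_iff, List.length_cons]
      rw [pvRankAux_shift]
      omega

theorem pvRankAux_eq_len (gs : List (List String)) (r : String)
    (h : ∀ g ∈ gs, r ∉ g) : pvRankAux gs 0 r = gs.length := by
  induction gs with
  | nil => rfl
  | cons g gs ih =>
    have hm : r ∉ g := h g List.mem_cons_self
    simp only [pvRankAux, List.contains_eq_mem, hm, decide_false, Bool.false_eq_true,
      if_neg, not_false_iff, List.length_cons]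
    rw [pvRankAux_shift, ih (fun g' hg' => h g' (List.mem_cons_of_mem _ hg'))]
    omega

theorem pvRankAux_mem' (r : String) :
    ∀ (gs : List (List String)) (i : Nat) (hi : i < gs.length),
      pvRankAux gs 0 r = i → r ∈ gs[i] := by
  intro gs
  induction gs with
  | nil => intro i hi; simp at hi
  | cons g gs ih =>
    intro i hi heq
    by_cases hm : r ∈ g
    · have h0 : pvRankAux (g :: gs) 0 r = 0 := by
        simp [pvRankAux, List.contains_eq_mem, hm]
      rw [h0] at heq
      subst heq
      simpa using hm
    · have h1 : pvRankAux (g :: gs) 0 r = pvRankAux gs 0 r + 1 := by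
        simp only [pvRankAux, List.contains_eq_mem, hm, decide_false, Bool.false_eq_true,
          if_neg, not_false_iff]
        rw [pvRankAux_shift]
        omega
      rw [h1] at heq
      cases i with
      | zero => omega
      | succ j =>
        have hj : j < gs.length := by simpa using hi
        have : pvRankAux gs 0 r = j := by omega
        simpa [List.getElem_cons_succ] using ih j hj this

theorem pvRankAux_mem (gs : List (List String)) (r : String)
    (h : pvRankAux gs 0 r < gs.length) : r ∈ gs[pvRankAux gs 0 r] :=
  pvRankAux_mem' r gs _ h rfl

theorem pvRankAux_lt_of_mem (gs : List (List String)) (r : String) {i : Nat} (hi : i < gs.length)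
    (h : r ∈ gs[i]) : pvRankAux gs 0 r < gs.length := by
  induction gs generalizing i with
  | nil => simp at hi
  | cons g gs ih =>
    by_cases hm : r ∈ g
    · simp [pvRankAux, List.contains_eq_mem, hm]
    · have h1 : pvRankAux (g :: gs) 0 r = pvRankAux gs 0 r + 1 := by
        simp only [pvRankAux, List.contains_eq_mem, hm, decide_false, Bool.false_eq_true,
          if_neg, not_false_iff]
        rw [pvRankAux_shift]
        omega
      rw [h1]
      simp only [List.length_cons]
      cases i with
      | zero =>
        exact absurd (by simpa using h) hm
      | succ j =>
        have hj : j < gs.length := by simpa using hi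
        have := ih hj (by simpa using h)
        omega

theorem pvRankAux_eq_iff (gs : List (List String))
    (hd : gs.Pairwise (fun g h => ∀ r, r ∈ g → r ∉ h)) (r : String) {i : Nat}
    (hi : i < gs.length) : pvRankAux gs 0 r = i ↔ r ∈ gs[i] := by
  constructor
  · intro h
    subst h
    exact pvRankAux_mem gs r hi
  · intro h
    have hlt := pvRankAux_lt_of_mem gs r hi h
    have hm := pvRankAux_mem gs r hlt
    by_contra hne
    have hpw := List.pairwise_iff_getElem.mp hd
    rcases Nat.lt_or_ge (pvRankAux gs 0 r) i with hlti | hgei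
    · exact (hpw _ _ hlt hi hlti r hm) h
    · have hgt : i < pvRankAux gs 0 r := by omega
      exact (hpw _ _ hi hlt hgt r h) hm

-- the buckets after processing l
def pvBkts (gs : List (List String)) (l : List String) : List (List String) :=
  (List.range (gs.length + 1)).map
    (fun i => (PySem.Set.ofList l).filter (fun r => pvRankAux gs 0 r == i))

theorem pvOfList_snoc (l : List String) (r : String) :
    PySem.Set.ofList (l ++ [r]) = PySem.Set.add (PySem.Set.ofList l) r := by
  rw [PySem.Set.ofList_eq_foldl, List.foldl_append]
  simp [PySem.Set.ofList_eq_foldl]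

theorem pvBkts_snoc_mem (gs : List (List String)) (l : List String) (r : String) (hr : r ∈ l) :
    pvBkts gs (l ++ [r]) = pvBkts gs l := by
  have hc : PySem.Set.contains (PySem.Set.ofList l) r = true := by
    simp [PySem.Set.contains, List.contains_eq_mem, PySem.Set.mem_ofList, hr]
  unfold pvBkts
  rw [pvOfList_snoc]
  simp [PySem.Set.add, hc, hr]

theorem pvBkts_snoc_new (gs : List (List String)) (l : List String) (r : String) (hr : r ∉ l) :
    pvBkts gs (l ++ [r])
      = (pvBkts gs l).set (pvRankAux gs 0 r)
          ((pvBkts gs l).getD (pvRankAux gs 0 r) [] ++ [r]) := by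
  have hc : PySem.Set.contains (PySem.Set.ofList l) r = false := by
    simp [PySem.Set.contains, List.contains_eq_mem, PySem.Set.mem_ofList, hr]
  have hsnoc : PySem.Set.ofList (l ++ [r]) = PySem.Set.ofList l ++ [r] := by
    rw [pvOfList_snoc]
    simp [PySem.Set.add, hc, hr, PySem.Set.mem_ofList]
  have hjlt : pvRankAux gs 0 r < gs.length + 1 := Nat.lt_succ_of_le (pvRankAux_le gs r)
  have hlenB : (pvBkts gs l).length = gs.length + 1 := by simp [pvBkts]
  have hgetB : ∀ (i : Nat) (hi : i < gs.length + 1),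
      (pvBkts gs l)[i]'(by rw [hlenB]; exact hi)
        = (PySem.Set.ofList l).filter (fun x => pvRankAux gs 0 x == i) := by
    intro i hi
    simp [pvBkts]
  apply List.ext_getElem
  · simp [pvBkts, List.length_set]
  · intro i hi1 hi2
    have hi : i < gs.length + 1 := by simpa [pvBkts] using hi1
    rw [List.getElem_set]
    have hL : (pvBkts gs (l ++ [r]))[i]'hi1
        = (PySem.Set.ofList l).filter (fun x => pvRankAux gs 0 x == i)
          ++ (if pvRankAux gs 0 r == i then [r] else []) := by
      simp only [pvBkts, List.getElem_map, List.getElem_range, hsnoc, List.filter_append]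
      congr 1
      simp [List.filter_singleton]
    rw [hL]
    by_cases hji : pvRankAux gs 0 r = i
    · rw [if_pos hji, List.getD_eq_getElem _ _ (by rw [hlenB]; exact hjlt)]
      rw [hgetB _ hjlt]
      simp [hji]
    · rw [if_neg hji]
      rw [hgetB _ hi]
      simp [hji]

theorem pvBkts_nil (gs : List (List String)) :
    pvBkts gs [] = List.replicate (gs.length + 1) [] := by
  simp [pvBkts, PySem.Set.ofList, List.map_const']

theorem pvB_invariant (gs : List (List String)) :
    ∀ (regions l : List String),
      regions.foldl
        (fun (st : PySem.Set String × List (List String)) region =>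
          if PySem.Set.contains st.1 region then st
          else (PySem.Set.add st.1 region,
                st.2.set (pvRankAux gs 0 region)
                  (st.2.getD (pvRankAux gs 0 region) [] ++ [region])))
        (PySem.Set.ofList l, pvBkts gs l)
      = (PySem.Set.ofList (l ++ regions), pvBkts gs (l ++ regions)) := by
  intro regions
  induction regions with
  | nil => intro l; simp
  | cons x t ih =>
    intro l
    simp only [List.foldl_cons]
    have hcons : l ++ x :: t = (l ++ [x]) ++ t := by simp
    by_cases hx : x ∈ l
    · have hc : PySem.Set.contains (PySem.Set.ofList l) x = true := by
        simp [PySem.Set.contains, List.contains_eq_mem, PySem.Set.mem_ofList, hx]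
      rw [if_pos hc]
      have e1 : PySem.Set.ofList l = PySem.Set.ofList (l ++ [x]) := by
        rw [pvOfList_snoc]
        simp [PySem.Set.add, hc, hx, PySem.Set.mem_ofList]
      have e2 : pvBkts gs l = pvBkts gs (l ++ [x]) := (pvBkts_snoc_mem gs l x hx).symm
      rw [hcons, e1, e2]
      exact ih (l ++ [x])
    · have hc : PySem.Set.contains (PySem.Set.ofList l) x = false := by
        simp [PySem.Set.contains, List.contains_eq_mem, PySem.Set.mem_ofList, hx]
      rw [if_neg (by simp [PySem.Set.contains, List.contains_eq_mem, PySem.Set.mem_ofList, hx])]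
      have e1 : PySem.Set.add (PySem.Set.ofList l) x = PySem.Set.ofList (l ++ [x]) :=
        (pvOfList_snoc l x).symm
      have e2 : (pvBkts gs l).set (pvRankAux gs 0 x)
            ((pvBkts gs l).getD (pvRankAux gs 0 x) [] ++ [x]) = pvBkts gs (l ++ [x]) :=
        (pvBkts_snoc_new gs l x hx).symm
      rw [hcons]
      calc _ = t.foldl _ (PySem.Set.ofList (l ++ [x]), pvBkts gs (l ++ [x])) := by rw [← e1, ← e2]
        _ = _ := ih (l ++ [x])

-- the bucket list is exactly A's per-group blocks plus the leftover block
theorem pvBkts_decompose (gs : List (List String))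
    (hd : gs.Pairwise (fun g h => ∀ r, r ∈ g → r ∉ h)) (regions : List String) :
    pvBkts gs regions
      = gs.map (fun g => PySem.Set.ofList (regions.filter (fun r => g.contains r)))
        ++ [PySem.Set.ofList (regions.filter (fun r => !gs.any (fun g => g.contains r)))] := by
  apply List.ext_getElem
  · simp [pvBkts]
  · intro i hi1 hi2
    have hi : i < gs.length + 1 := by simpa [pvBkts] using hi1
    have hL : (pvBkts gs regions)[i]'hi1
        = (PySem.Set.ofList regions).filter (fun x => pvRankAux gs 0 x == i) := by
      simp [pvBkts]
    rw [hL]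
    by_cases hik : i < gs.length
    · have hR : (gs.map (fun g => PySem.Set.ofList (regions.filter (fun r => g.contains r)))
            ++ [PySem.Set.ofList (regions.filter (fun r => !gs.any (fun g => g.contains r)))])[i]'hi2
          = PySem.Set.ofList (regions.filter (fun r => (gs[i]'hik).contains r)) := by
        rw [List.getElem_append_left (by simpa using hik)]
        simp
      rw [hR]
      have hcong : ∀ x ∈ PySem.Set.ofList regions,
          (pvRankAux gs 0 x == i) = (gs[i]'hik).contains x := by
        intro x _
        rw [List.contains_eq_mem, Bool.eq_iff_iff]
        simp only [beq_iff_eq, decide_eq_true_eq]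
        exact pvRankAux_eq_iff gs hd x hik
      rw [List.filter_congr hcong, pvOfList_filter]
    · have hik' : i = gs.length := by omega
      subst hik'
      have hR : (gs.map (fun g => PySem.Set.ofList (regions.filter (fun r => g.contains r)))
            ++ [PySem.Set.ofList (regions.filter (fun r => !gs.any (fun g => g.contains r)))])[gs.length]'hi2
          = PySem.Set.ofList (regions.filter (fun r => !gs.any (fun g => g.contains r))) := by
        have hlen : (gs.map (fun g => PySem.Set.ofList (regions.filter (fun r => g.contains r)))).length = gs.length := by simp
        rw [List.getElem_append_right (by simp)]
        simp
      rw [hR]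
      have hcong : ∀ x ∈ PySem.Set.ofList regions,
          (pvRankAux gs 0 x == gs.length) = (!gs.any (fun g => g.contains x)) := by
        intro x _
        by_cases hall : ∀ g ∈ gs, x ∉ g
        · have h2 : gs.any (fun g => g.contains x) = false := by
            rw [List.any_eq_false]
            intro g hg
            simp [List.contains_eq_mem, hall g hg]
          rw [pvRankAux_eq_len gs x hall, h2]
          simp
        · push_neg at hall
          obtain ⟨g, hg, hxg⟩ := hall
          obtain ⟨j, hj, hgj⟩ := List.mem_iff_getElem.mp hg
          have hlt := pvRankAux_lt_of_mem gs x hj (hgj ▸ hxg)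
          have hne : (pvRankAux gs 0 x == gs.length) = false := by
            simp only [beq_eq_false_iff_ne, ne_eq]
            omega
          have hany : gs.any (fun g => g.contains x) = true := by
            rw [List.any_eq_true]
            exact ⟨g, hg, by simp [List.contains_eq_mem, hxg]⟩
          rw [hne, hany]
          simp
      rw [List.filter_congr hcong, pvOfList_filter]

-- main generic equivalence, for any pairwise-disjoint group list
theorem pvMain (gs : List (List String))
    (hd : gs.Pairwise (fun g h => ∀ r, r ∈ g → r ∉ h)) (regions : List String) :
    regions.foldl
      (fun acc region => if !(acc.contains region) then acc ++ [region] else acc)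
      (gs.foldl (fun acc group_regions => regions.foldl
        (fun acc region =>
          if group_regions.contains region && !(acc.contains region) then acc ++ [region] else acc)
        acc) [])
    = (regions.foldl
        (fun (st : PySem.Set String × List (List String)) region =>
          if PySem.Set.contains st.1 region then st
          else (PySem.Set.add st.1 region,
                st.2.set (pvRankAux gs 0 region)
                  (st.2.getD (pvRankAux gs 0 region) [] ++ [region])))
        (PySem.Set.empty, List.replicate (gs.length + 1) [])).2.flatten := by
  -- the right-hand side: bucket invariant from the empty state
  have hstart : ((PySem.Set.empty : PySem.Set String), List.replicate (gs.length + 1) ([] : List String))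
      = (PySem.Set.ofList [], pvBkts gs []) := by
    rw [pvBkts_nil]
    rfl
  rw [hstart, pvB_invariant gs regions []]
  simp only [List.nil_append]
  rw [pvBkts_decompose gs hd regions, List.flatten_append]
  -- the left-hand side: grouped phase then trailing phase
  have hgrouped := pvOuter regions gs [] hd (by intro g hg r hr; simp at hr)
  rw [List.nil_append] at hgrouped
  rw [hgrouped]
  have hp : ∀ r ∈ regions, (fun r => !gs.any (fun g => g.contains r)) r = false →
      ((gs.map (fun g => PySem.Set.ofList (regions.filter (fun r => g.contains r)))).flatten).contains r = true := by
    intro r hr hfalse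
    simp only [Bool.not_eq_false'] at hfalse
    rw [List.any_eq_true] at hfalse
    obtain ⟨g, hg, hgr⟩ := hfalse
    have hrg : r ∈ g := by simpa [List.contains_eq_mem] using hgr
    rw [List.contains_eq_mem]
    simp only [decide_eq_true_eq]
    rw [List.mem_flatten]
    refine ⟨PySem.Set.ofList (regions.filter (fun r => g.contains r)), ?_, ?_⟩
    · exact List.mem_map.mpr ⟨g, hg, rfl⟩
    · rw [PySem.Set.mem_ofList, List.mem_filter]
      exact ⟨hr, by simp [List.contains_eq_mem, hrg]⟩
  rw [pvFinal_pass (fun r => !gs.any (fun g => g.contains r)) regions _ hp]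
  have hacc0 : ∀ r, (fun r => !gs.any (fun g => g.contains r)) r = true →
      ((gs.map (fun g => PySem.Set.ofList (regions.filter (fun r => g.contains r)))).flatten).contains r = false := by
    intro r hfalse
    simp only [Bool.not_eq_true'] at hfalse
    rw [List.any_eq_false] at hfalse
    rw [List.contains_eq_mem]
    simp only [decide_eq_false_iff_not]
    rw [List.mem_flatten]
    rintro ⟨b, hb, hrb⟩
    obtain ⟨g, hg, rfl⟩ := List.mem_map.mp hb
    rw [PySem.Set.mem_ofList, List.mem_filter] at hrb
    have hgc : g.contains r = false := by
      have := hfalse g hg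
      simpa using this
    rw [hgc] at hrb
    simp at hrb
  have hpre := pvPass_prefix (fun r => !gs.any (fun g => g.contains r))
      ((gs.map (fun g => PySem.Set.ofList (regions.filter (fun r => g.contains r)))).flatten)
      hacc0 regions []
  rw [List.append_nil, pvPass_nil] at hpre
  rw [hpre]
  simp

-- the group lists looked up for any provider are pairwise disjoint
theorem pvValues_disjoint (provider : String) :
    ((pvGG.getD provider (PySem.Dict.mk [])).values).Pairwise (fun g h => ∀ r, r ∈ g → r ∉ h) := by
  by_cases ha : provider = "aws"
  · subst ha; decide
  · by_cases hg : provider = "gcp"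
    · subst hg; decide
    · have h1 : ("aws" == provider) = false := by
        simp only [beq_eq_false_iff_ne, ne_eq]
        exact fun h => ha h.symm
      have h2 : ("gcp" == provider) = false := by
        simp only [beq_eq_false_iff_ne, ne_eq]
        exact fun h => hg h.symm
      have : pvGG.getD provider (PySem.Dict.mk []) = PySem.Dict.mk [] := by
        rw [PySem.Dict.getD_eq_get?_getD, pvGG, PySem.Dict.get?_mk_cons, PySem.Dict.get?_mk_cons]
        simp [h1, h2, PySem.Dict.get?]
      rw [this]
      simp [PySem.Dict.values]

-- ===== VERDICT (by name: the statement is the Claim_ definition above) =====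
theorem sort_regions_geographically_py_spec : Claim_equal_sort_regions_geographically_py := by
  intro regions provider _
  unfold Spec_sort_regions_geographically_py
  unfold sort_regions_geographically_py sort_regions_geographically_py_alt
  exact pvMain _ (pvValues_disjoint provider) regions
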